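-- pv_equiv track=rewrite | github.com/junanida/Algorithm | 프로그래머스/1/82612. 부족한 금액 계산하기/부족한 금액 계산하기.py | solution
-- ===== SOURCE A (Python) =====
-- def solution(price, money, count):
--     answer = 0
--     for i in range(1, count+1):
--         money = money - (price * i)
--     if money >= 0:
--         return 0
--     else:
--         return -money
--     return answer
-- ===== SOURCE B (Python) =====
-- def solution(price, money, count):
--     n = count if count > 0 else 0
--     total = price * n * (n + 1) // 2
--     shortfall = total - money
--     return shortfall if shortfall > 0 else 0
-- ===== Notes on version B (the rewrite author's own statement) =====
-- stated objective: faster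
-- what changed: Replaces the O(count) loop that subtracts price*i per ride with the closed-form Gauss sum price*n*(n+1)//2 and a direct shortfall comparison.
import Mathlib
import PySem

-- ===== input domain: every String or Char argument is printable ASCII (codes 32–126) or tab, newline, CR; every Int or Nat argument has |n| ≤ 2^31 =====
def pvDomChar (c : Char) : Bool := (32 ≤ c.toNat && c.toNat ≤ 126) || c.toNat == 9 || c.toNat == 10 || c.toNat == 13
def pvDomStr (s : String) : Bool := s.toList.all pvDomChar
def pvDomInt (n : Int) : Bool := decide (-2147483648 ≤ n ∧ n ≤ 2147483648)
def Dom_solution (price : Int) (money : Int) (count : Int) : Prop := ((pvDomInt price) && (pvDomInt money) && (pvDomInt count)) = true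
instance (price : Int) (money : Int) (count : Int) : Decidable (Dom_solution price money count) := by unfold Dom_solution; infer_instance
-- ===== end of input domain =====

-- B replaces A's O(count) loop with the closed-form Gauss sum (O(1)); same value everywhere.

-- ===== PORT A =====
def solution (price : Int) (money : Int) (count : Int) : Int :=
  let money := (PySem.List.pyRange 1 (count + 1) 1).foldl (fun m i => m - price * i) money
  if money ≥ 0 then 0 else -money

-- ===== PORT B =====
def solution_alt (price : Int) (money : Int) (count : Int) : Int :=
  let n := if count > 0 then count else 0
  let total := PySem.Int.floordiv (price * n * (n + 1)) 2
  let shortfall := total - money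
  if shortfall > 0 then shortfall else 0

-- ===== PRECONDITION & SPEC =====
def Spec_solution (price : Int) (money : Int) (count : Int) (out : Int) : Prop := out = solution_alt price money count
instance (price : Int) (money : Int) (count : Int) (out : Int) : Decidable (Spec_solution price money count out) := by unfold Spec_solution; infer_instance

-- ===== CLAIM (what is proved, stated in full; the proofs are below) =====
def Claim_equal_solution : Prop := ∀ (price : Int) (money : Int) (count : Int), Dom_solution price money count → Spec_solution price money count (solution price money count)

-- ===== LEMMAS AND PROOFS =====

-- the loop's effect in closed form (doubled to avoid division)
theorem fold_twice (price : Int) : ∀ (n : Nat) (money : Int),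
    2 * ((PySem.List.pyRange 1 ((n : Int) + 1) 1).foldl (fun m i => m - price * i) money)
      = 2 * money - price * n * (n + 1) := by
  intro n
  induction n with
  | zero => intro money; simp [PySem.List.pyRange_one_eq_nil]
  | succ k ih =>
    intro money
    have h : (((k : Nat) + 1 : Nat) : Int) + 1 = ((k : Int) + 1) + 1 := by push_cast; ring
    rw [h, PySem.List.pyRange_one_succ_right (by omega : (1 : Int) ≤ (k : Int) + 1)]
    rw [List.foldl_append]
    simp only [List.foldl]
    have := ih money
    push_cast
    linear_combination this

theorem main_eq (price money count : Int) :
    solution price money count = solution_alt price money count := by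
  unfold solution solution_alt
  by_cases hc : count > 0
  · obtain ⟨n, hn⟩ : ∃ n : Nat, count = (n : Int) :=
      ⟨count.toNat, (Int.toNat_of_nonneg (le_of_lt hc)).symm⟩
    subst hn
    obtain ⟨k, hk⟩ : ∃ k : Int, (n : Int) * ((n : Int) + 1) = 2 * k := by
      rcases Int.even_mul_succ_self (n : Int) with ⟨k, hk⟩
      exact ⟨k, by omega⟩
    have hdiv : PySem.Int.floordiv (price * (n : Int) * ((n : Int) + 1)) 2 = price * k := by
      have : price * (n : Int) * ((n : Int) + 1) = 2 * (price * k) := by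
        rw [mul_assoc, hk]; ring
      rw [this, PySem.Int.floordiv_eq_ediv_of_pos (by norm_num)]
      exact Int.mul_ediv_cancel_left _ (by norm_num)
    have hfold := fold_twice price n money
    have hpk : price * (n : Int) * ((n : Int) + 1) = 2 * (price * k) := by
      rw [mul_assoc, hk]; ring
    simp only [hc, if_pos, hdiv]
    split_ifs <;> omega
  · have hnil : PySem.List.pyRange 1 (count + 1) 1 = [] :=
      PySem.List.pyRange_one_eq_nil (by omega)
    rw [hnil]
    simp only [List.foldl_nil, hc]
    norm_num [PySem.Int.floordiv]
    split_ifs <;> omega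

-- ===== VERDICT (by name: the statement is the Claim_ definition above) =====
theorem solution_spec : Claim_equal_solution := by
  intro price money count _
  exact main_eq price money count
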